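-- pv_equiv track=rewrite | github.com/meraki6512/Algorithm25 | python/boj13549.py | bfs
-- ===== SOURCE A (Python) =====
-- from collections import deque
--
-- MAX_SIZE = 100001
--
-- def bfs(N, K):
--
--     que = deque([(N, 0)])
--     visited = [False] * MAX_SIZE
--     visited[N] = True
--     ans = MAX_SIZE
--
--     while que:
--
--         X, t = que.popleft()
--         visited[X] = True           # 큐 전부 탐색해야 하므로 꺼낼 때 체크
--
--         if X == K:
--             ans = min(ans, t)
--             # break                 # ans 계속 업데이트해줘야 하므로 break하지X
--
--         # X+1, X-1: 가중치 1
--         for nx in (X+1, X-1):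
--             if 0 <= nx < MAX_SIZE and not visited[nx]:
--                 # visited[nx] = True
--                 que.append((nx, t + 1))
--
--         # X*2: 가중치 0
--         nx = X*2
--         if 0 <= nx < MAX_SIZE and not visited[nx]:
--             # visited[nx] = True
--             que.appendleft((nx, t))
--
--     return ans
-- ===== SOURCE B (Python) =====
-- MAX_SIZE = 100001
--
-- # Level-bucket 0-1 search: a current-level stack and a next-level list replace A's
-- # deque of (node, time) pairs, and the first time K is popped we can return at once
-- # (pop times never decrease), capped at the MAX_SIZE sentinel exactly as A's
-- # min(ans, t) caps it.  Return value only; no observable mutation of arguments.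
-- def bfs(N, K):
--     visited = [False] * MAX_SIZE
--     visited[N] = True
--     cur, nxt, t = [N], [], 0
--     while True:
--         while cur:
--             X = cur.pop()
--             visited[X] = True
--             if X == K:
--                 return min(t, MAX_SIZE)
--             for nx in (X + 1, X - 1):
--                 if 0 <= nx < MAX_SIZE and not visited[nx]:
--                     nxt.append(nx)
--             nx = X * 2
--             if 0 <= nx < MAX_SIZE and not visited[nx]:
--                 cur.append(nx)
--         if not nxt:
--             return MAX_SIZE
--         cur, nxt, t = nxt[::-1], [], t + 1
-- ===== Notes on version B (the rewrite author's own statement) =====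
-- stated objective: alternative
-- what changed: Replaces A's single deque of (node, time) pairs and exhaustive min-accumulation by a two-bucket level search (current-level stack + next-level list + level counter) that returns as soon as K is first popped, relying on pop times being non-decreasing.
import Mathlib
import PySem

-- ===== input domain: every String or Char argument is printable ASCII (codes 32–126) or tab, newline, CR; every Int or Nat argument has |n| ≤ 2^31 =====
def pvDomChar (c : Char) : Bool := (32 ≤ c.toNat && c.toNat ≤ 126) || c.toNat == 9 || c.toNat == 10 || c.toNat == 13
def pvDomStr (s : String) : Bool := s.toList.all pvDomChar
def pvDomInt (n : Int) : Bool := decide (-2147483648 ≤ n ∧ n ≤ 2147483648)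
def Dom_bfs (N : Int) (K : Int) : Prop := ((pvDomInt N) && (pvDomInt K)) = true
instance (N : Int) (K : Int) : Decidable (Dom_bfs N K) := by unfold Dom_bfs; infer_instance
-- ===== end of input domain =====

-- B replaces A's exhaustive deque of (node, time) pairs by a current-level stack plus a
-- next-level list with a level counter, and returns as soon as K is first popped.
-- Return value only: both programs only mutate locals, no argument is mutated.

-- Shared primitive: Python's `visited[i]` read / `visited[i] = True` write on the
-- fixed-length MAX_SIZE list, including Python's negative-index wraparound
-- (exact for the indices the admitted inputs reach: -100001 ≤ i).
def pvVisIdx (i : Int) : Int := if i < 0 then i + 100001 else i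
def pvVisGet (v : Array Bool) (i : Int) : Bool := v.getD (pvVisIdx i).toNat false
def pvVisSet (v : Array Bool) (i : Int) : Array Bool :=
  if 0 ≤ pvVisIdx i then v.setIfInBounds (pvVisIdx i).toNat true else v

-- ===== PORT A =====
-- collections.deque ported as the standard two-list functional deque (front, back);
-- its contents are front ++ back.reverse.  Fuel 1048576 strictly exceeds the number of
-- pops A performs on any admitted input (≤ ~150000; the fuel branch is never reached).
def bfsPop (q : List (Int × Int) × List (Int × Int)) :
    Option ((Int × Int) × (List (Int × Int) × List (Int × Int))) :=
  match q with
  | (x :: f, b) => some (x, (f, b))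
  | ([], b) =>
    match b.reverse with
    | [] => none
    | x :: r => some (x, (r, []))

def bfsAppend (q : List (Int × Int) × List (Int × Int)) (y : Int × Int) :
    List (Int × Int) × List (Int × Int) := (q.1, y :: q.2)

def bfsAppendLeft (q : List (Int × Int) × List (Int × Int)) (y : Int × Int) :
    List (Int × Int) × List (Int × Int) := (y :: q.1, q.2)

-- the three conditional pushes of A's loop body (X+1 and X-1 appended, X*2 appendleft)
def bfsPush (q1 : List (Int × Int) × List (Int × Int)) (X t : Int) (vis1 : Array Bool) :
    List (Int × Int) × List (Int × Int) :=
  let q2 := if 0 ≤ X + 1 ∧ X + 1 < 100001 ∧ ¬pvVisGet vis1 (X + 1) then bfsAppend q1 (X + 1, t + 1) else q1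
  let q3 := if 0 ≤ X - 1 ∧ X - 1 < 100001 ∧ ¬pvVisGet vis1 (X - 1) then bfsAppend q2 (X - 1, t + 1) else q2
  if 0 ≤ X * 2 ∧ X * 2 < 100001 ∧ ¬pvVisGet vis1 (X * 2) then bfsAppendLeft q3 (X * 2, t) else q3

def bfsLoop (K : Int) : Nat → (List (Int × Int) × List (Int × Int)) → Array Bool → Int → Int
  | 0, _, _, ans => ans
  | fuel + 1, q, vis, ans =>
    match bfsPop q with
    | none => ans
    | some ((X, t), q1) =>
      let vis1 := pvVisSet vis X
      let ans1 := if X = K then min ans t else ans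
      bfsLoop K fuel (bfsPush q1 X t vis1) vis1 ans1

def bfs (N : Int) (K : Int) : Int :=
  bfsLoop K 1048576 ([(N, 0)], []) (pvVisSet (Array.replicate 100001 false) N) 100001

-- ===== PORT B =====
-- Python lists used as stacks are represented head-as-top; `nxt` is kept with the most
-- recently appended element at the head, so Python's `nxt[::-1]` becomes `nxt.reverse`.
-- Same fuel as port A (B performs a prefix of A's pops); the fuel branch is never reached.
def bfsAltPush (cur1 nxt : List Int) (X : Int) (vis1 : Array Bool) : List Int × List Int :=
  let nxt1 := if 0 ≤ X + 1 ∧ X + 1 < 100001 ∧ ¬pvVisGet vis1 (X + 1) then (X + 1) :: nxt else nxt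
  let nxt2 := if 0 ≤ X - 1 ∧ X - 1 < 100001 ∧ ¬pvVisGet vis1 (X - 1) then (X - 1) :: nxt1 else nxt1
  let cur2 := if 0 ≤ X * 2 ∧ X * 2 < 100001 ∧ ¬pvVisGet vis1 (X * 2) then (X * 2) :: cur1 else cur1
  (cur2, nxt2)

def bfsAltLoop (K : Int) (fuel : Nat) (cur nxt : List Int) (t : Int) (vis : Array Bool) : Int :=
  match fuel with
  | 0 => 100001
  | f + 1 =>
    match cur with
    | [] => if nxt.isEmpty then 100001 else bfsAltLoop K (f + 1) nxt.reverse [] (t + 1) vis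
    | X :: cur1 =>
      let vis1 := pvVisSet vis X
      if X = K then min t 100001
      else
        let p := bfsAltPush cur1 nxt X vis1
        bfsAltLoop K f p.1 p.2 t vis1
termination_by (fuel, nxt.length)
decreasing_by
  · exact Prod.Lex.right _ (by simp_all [List.isEmpty_iff, List.length_pos_iff])
  · exact Prod.Lex.left _ _ (Nat.lt_succ_self f)

def bfs_alt (N : Int) (K : Int) : Int :=
  bfsAltLoop K 1048576 [N] [] 0 (pvVisSet (Array.replicate 100001 false) N)

-- ===== PRECONDITION & SPEC =====
-- Pre_ excludes exactly the N for which Python's `visited[N] = True` raises IndexError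
-- (N > 100000 or N < -100001); A returns normally on every other admitted input.
def Pre_bfs (N : Int) (K : Int) : Prop := -100001 ≤ N ∧ N ≤ 100000
instance (N : Int) (K : Int) : Decidable (Pre_bfs N K) := by unfold Pre_bfs; infer_instance
def pvWitness_bfs : Int × Int := (3, 9)

def Spec_bfs (N : Int) (K : Int) (out : Int) : Prop := out = bfs_alt N K
instance (N : Int) (K : Int) (out : Int) : Decidable (Spec_bfs N K out) := by unfold Spec_bfs; infer_instance

-- ===== CLAIM (what is proved, stated in full; the proofs are below) =====
def Claim_equal_bfs : Prop := ∀ (N : Int) (K : Int), Dom_bfs N K → Pre_bfs N K → Spec_bfs N K (bfs N K)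

-- ===== LEMMAS AND PROOFS =====

def dqToList (q : List (Int × Int) × List (Int × Int)) : List (Int × Int) := q.1 ++ q.2.reverse

theorem bfsPop_none {q : List (Int × Int) × List (Int × Int)} (h : bfsPop q = none) :
    dqToList q = [] := by
  obtain ⟨f, b⟩ := q
  cases f with
  | cons x f => simp [bfsPop] at h
  | nil =>
    simp only [bfsPop] at h
    cases hb : b.reverse with
    | nil => simp [dqToList, hb]
    | cons x r => rw [hb] at h; simp at h

theorem bfsPop_some {q q1 : List (Int × Int) × List (Int × Int)} {x : Int × Int}
    (h : bfsPop q = some (x, q1)) : dqToList q = x :: dqToList q1 := by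
  obtain ⟨f, b⟩ := q
  cases f with
  | cons y f =>
    simp only [bfsPop, Option.some.injEq, Prod.mk.injEq] at h
    obtain ⟨rfl, rfl⟩ := h
    simp [dqToList]
  | nil =>
    simp only [bfsPop] at h
    cases hb : b.reverse with
    | nil => rw [hb] at h; simp at h
    | cons y r =>
      rw [hb] at h
      simp only [Option.some.injEq, Prod.mk.injEq] at h
      obtain ⟨rfl, rfl⟩ := h
      simp [dqToList, hb]

theorem dqToList_append (q : List (Int × Int) × List (Int × Int)) (y : Int × Int) :
    dqToList (bfsAppend q y) = dqToList q ++ [y] := by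
  simp [dqToList, bfsAppend]

theorem dqToList_appendLeft (q : List (Int × Int) × List (Int × Int)) (y : Int × Int) :
    dqToList (bfsAppendLeft q y) = y :: dqToList q := by
  simp [dqToList, bfsAppendLeft]

-- A's pushes and B's pushes build the same queue, read through the level invariant.
theorem push_toList (q1 : List (Int × Int) × List (Int × Int)) (cur1 nxt : List Int)
    (X t : Int) (vis1 : Array Bool)
    (h : dqToList q1 = cur1.map (fun x => (x, t)) ++ nxt.reverse.map (fun x => (x, t + 1))) :
    dqToList (bfsPush q1 X t vis1) =
      (bfsAltPush cur1 nxt X vis1).1.map (fun x => (x, t)) ++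
      (bfsAltPush cur1 nxt X vis1).2.reverse.map (fun x => (x, t + 1)) := by
  unfold bfsPush bfsAltPush
  split_ifs <;>
    simp [dqToList_append, dqToList_appendLeft, h, List.map_append, List.append_assoc]

-- every element added by A's pushes is one of the three pushed pairs
theorem mem_push {q1 : List (Int × Int) × List (Int × Int)} {X t : Int} {vis1 : Array Bool}
    {p : Int × Int} (hp : p ∈ dqToList (bfsPush q1 X t vis1)) :
    p ∈ dqToList q1 ∨ p = (X + 1, t + 1) ∨ p = (X - 1, t + 1) ∨ p = (X * 2, t) := by
  unfold bfsPush at hp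
  split_ifs at hp <;>
    simp only [dqToList_append, dqToList_appendLeft, List.mem_append, List.mem_cons] at hp <;> tauto

-- every time in the queue after A's pushes is ≥ ans, provided that held before and ans ≤ t
theorem push_le (q1 : List (Int × Int) × List (Int × Int)) (X t : Int) (vis1 : Array Bool)
    (ans : Int) (h1 : ∀ p ∈ dqToList q1, ans ≤ p.2) (ht : ans ≤ t) :
    ∀ p ∈ dqToList (bfsPush q1 X t vis1), ans ≤ p.2 := by
  intro p hp
  rcases mem_push hp with h | rfl | rfl | rfl
  · exact h1 p h
  · simpa using by omega
  · simpa using by omega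
  · simpa using ht

-- A's min-accumulator is absorbing: once every queued time is ≥ ans, ans never changes again.
theorem bfsLoop_absorb (K : Int) : ∀ (fuel : Nat) (q : List (Int × Int) × List (Int × Int))
    (vis : Array Bool) (ans : Int),
    (∀ p ∈ dqToList q, ans ≤ p.2) → bfsLoop K fuel q vis ans = ans := by
  intro fuel
  induction fuel with
  | zero => intro q vis ans _; rfl
  | succ f ih =>
    intro q vis ans hq
    rw [bfsLoop]
    cases hpop : bfsPop q with
    | none => rfl
    | some v =>
      obtain ⟨⟨X, t⟩, q1⟩ := v
      have hlist := bfsPop_some hpop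
      have ht : ans ≤ t := hq (X, t) (by rw [hlist]; exact List.mem_cons_self)
      have hq1 : ∀ p ∈ dqToList q1, ans ≤ p.2 := fun p hp =>
        hq p (by rw [hlist]; exact List.mem_cons_of_mem _ hp)
      have hans : (if X = K then min ans t else ans) = ans := by
        split <;> simp [min_eq_left ht]
      simp only [hans]
      exact ih _ _ _ (push_le q1 X t _ ans hq1 ht)

-- the bisimulation: A's deque always consists of the current-level block then the
-- next-level block, matching B's two buckets; ans stays at the 100001 sentinel until
-- K is popped, at which point A's remaining run is absorbed at min 100001 t.
theorem bfsSim (K : Int) (fuel : Nat) (cur nxt : List Int) (t : Int) (vis : Array Bool)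
    (q : List (Int × Int) × List (Int × Int))
    (hq : dqToList q = cur.map (fun x => (x, t)) ++ nxt.reverse.map (fun x => (x, t + 1))) :
    bfsLoop K fuel q vis 100001 = bfsAltLoop K fuel cur nxt t vis := by
  match fuel with
  | 0 => rw [bfsAltLoop.eq_def]; rfl
  | f + 1 =>
    cases cur with
    | nil =>
      rw [bfsAltLoop.eq_def]
      by_cases hne : nxt.isEmpty
      · have hnil : nxt = [] := List.isEmpty_iff.mp hne
        subst hnil
        simp only [List.map_nil, List.nil_append, List.reverse_nil] at hq
        rw [bfsLoop]
        cases hpop : bfsPop q with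
        | none => simp
        | some v =>
          obtain ⟨x, q1⟩ := v
          rw [bfsPop_some hpop] at hq
          simp at hq
      · simp only [hne, Bool.false_eq_true, if_false]
        exact bfsSim K (f + 1) nxt.reverse [] (t + 1) vis q (by simpa using hq)
    | cons X cur1 =>
      have hq' : dqToList q
          = (X, t) :: (cur1.map (fun x => (x, t)) ++ nxt.reverse.map (fun x => (x, t + 1))) := by
        simpa using hq
      rw [bfsLoop]
      cases hpop : bfsPop q with
      | none => rw [bfsPop_none hpop] at hq'; simp at hq'
      | some v =>
        obtain ⟨⟨Y, s⟩, q1⟩ := v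
        have hl := (bfsPop_some hpop).symm.trans hq'
        simp only [List.cons.injEq, Prod.mk.injEq] at hl
        obtain ⟨⟨rfl, rfl⟩, hrest⟩ := hl
        rw [bfsAltLoop.eq_def]
        by_cases hXK : Y = K
        · simp only [hXK, if_true]
          rw [bfsLoop_absorb]
          · exact min_comm _ _
          · apply push_le _ _ _ _ _ _ (min_le_right _ _)
            intro p hp
            rw [hrest] at hp
            simp only [List.mem_append, List.mem_map] at hp
            rcases hp with ⟨x, _, rfl⟩ | ⟨x, _, rfl⟩
            · exact min_le_right _ _
            · exact le_trans (min_le_right _ _) (by omega)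
        · simp only [hXK, if_false]
          exact bfsSim K f (bfsAltPush cur1 nxt Y (pvVisSet vis Y)).1
            (bfsAltPush cur1 nxt Y (pvVisSet vis Y)).2 s (pvVisSet vis Y) _
            (push_toList q1 cur1 nxt Y s (pvVisSet vis Y) hrest)
  termination_by (fuel, nxt.length)
  decreasing_by
    · refine Prod.Lex.right _ ?_
      simp only [List.length_nil]
      have : nxt ≠ [] := fun h => by simp [h] at hne
      exact List.length_pos_iff.mpr this
    · exact Prod.Lex.left _ _ (Nat.lt_succ_self f)

-- ===== VERDICT (by name: the statement is the Claim_ definition above) =====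
theorem bfs_spec : Claim_equal_bfs := by
  intro N K _ _
  unfold Spec_bfs bfs bfs_alt
  exact bfsSim K 1048576 [N] [] 0 _ ([(N, 0)], []) (by simp [dqToList])
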